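-- pv_equiv track=rewrite | github.com/shashank231/practice-design | zcodes/raman3.py | max_to_right_fun
-- ===== SOURCE A (Python) =====
-- def max_to_right_fun(arr):
--     lenArr = len(arr)
--     lastIndex = lenArr - 1
--     ansArr = [-1] * lenArr
--     maxEle = arr[lastIndex]
--
--     for index in range(lastIndex-1, -1, -1):
--         if arr[index] < maxEle:
--             ansArr[index] = maxEle
--         else:
--             maxEle = arr[index]
--
--     return ansArr
-- ===== SOURCE B (Python) =====
-- def max_to_right_fun(arr):
--     def go(a):
--         # divide and conquer: go(a)[i] == max(a[i:]) (inclusive suffix maxima)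
--         if len(a) <= 1:
--             return a[:]
--         mid = len(a) // 2
--         tl = go(a[:mid])
--         tr = go(a[mid:])
--         return [max(s, tr[0]) for s in tl] + tr
--     t = go(arr)
--     return [m if x < m else -1 for x, m in zip(arr, t[1:])] + [-1]
-- ===== Notes on version B (the rewrite author's own statement) =====
-- stated objective: alternative
-- what changed: Replaces A's single backward running-maximum scan by a divide-and-conquer recursion that builds an inclusive suffix-maximum table from merged halves, then a zip pass that decides each entry from the table.
import Mathlib
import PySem

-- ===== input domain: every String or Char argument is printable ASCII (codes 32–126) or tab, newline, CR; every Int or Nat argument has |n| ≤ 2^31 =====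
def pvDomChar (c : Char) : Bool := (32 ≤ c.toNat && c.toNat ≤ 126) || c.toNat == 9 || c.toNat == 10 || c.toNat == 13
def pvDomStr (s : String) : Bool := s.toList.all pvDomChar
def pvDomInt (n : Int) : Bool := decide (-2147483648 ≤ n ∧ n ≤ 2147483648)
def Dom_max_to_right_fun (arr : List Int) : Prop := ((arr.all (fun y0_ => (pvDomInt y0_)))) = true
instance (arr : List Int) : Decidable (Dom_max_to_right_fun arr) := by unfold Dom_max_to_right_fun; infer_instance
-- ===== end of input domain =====

-- B replaces A's backward running-maximum scan by a divide-and-conquer recursion building an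
-- inclusive suffix-maximum table from merged halves, plus a zip pass deciding each entry (objective: alternative).


-- ===== PORT A =====
-- one loop iteration of A: reads arr[index]; sets ansArr[index] (index ≥ 0 in the loop,
-- so List.set at index.toNat is exact) or updates maxEle
def pyAstep (arr : List Int) (st : List Int × Int) (index : Int) : List Int × Int :=
  match PySem.List.pyGet? arr index with
  | none => st
  | some a => if a < st.2 then (st.1.set index.toNat st.2, st.2) else (st.1, a)

def max_to_right_fun (arr : List Int) : List Int :=
  let lenArr : Int := (arr.length : Int)
  let lastIndex : Int := lenArr - 1
  match PySem.List.pyGet? arr lastIndex with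
  | none => []   -- IndexError on the empty list; excluded by Pre_
  | some maxEle =>
      ((PySem.List.pyRange (lastIndex - 1) (-1) (-1)).foldl (pyAstep arr)
        (List.replicate arr.length (-1), maxEle)).1

-- ===== PORT B =====
-- B's recursion go: inclusive suffix maxima by divide and conquer.
-- tr is never empty in a call the Python reaches (mid < len), so tr[0] is ported as
-- (pyGet? tr 0).getD 0 — the default is never used; the len ≤ 1 guard makes the
-- same computation total (Python's go diverges only on [], unreachable from Source B's calls).
def pyGo (a : List Int) : List Int :=
  if a.length ≤ 1 then a
  else
    let mid : Int := PySem.Int.floordiv (a.length : Int) 2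
    let tl := pyGo (PySem.List.slice a none (some mid))
    let tr := pyGo (PySem.List.slice a (some mid) none)
    tl.map (fun s => max s ((PySem.List.pyGet? tr 0).getD 0)) ++ tr
termination_by a.length
decreasing_by
  · have h2 : PySem.Int.floordiv ((a.length : Nat) : Int) ((2 : Nat) : Int) = ((a.length / 2 : Nat) : Int) :=
      PySem.Int.floordiv_natCast a.length 2
    rw [show ((2 : Nat) : Int) = (2 : Int) by norm_num] at h2
    rw [h2, PySem.List.slice_to_natCast]
    simp only [List.length_take]
    omega
  · have h2 : PySem.Int.floordiv ((a.length : Nat) : Int) ((2 : Nat) : Int) = ((a.length / 2 : Nat) : Int) :=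
      PySem.Int.floordiv_natCast a.length 2
    rw [show ((2 : Nat) : Int) = (2 : Int) by norm_num] at h2
    rw [h2, PySem.List.slice_from_natCast]
    simp only [List.length_drop]
    omega

def max_to_right_fun_alt (arr : List Int) : List Int :=
  let t := pyGo arr
  (arr.zip (PySem.List.slice t (some 1) none)).map
    (fun xm => if xm.1 < xm.2 then xm.2 else -1) ++ [-1]

-- ===== PRECONDITION & SPEC =====
-- Python A raises IndexError on the empty list (arr[-1]); that is the only exclusion.
def Pre_max_to_right_fun (arr : List Int) : Prop := arr ≠ []
instance (arr : List Int) : Decidable (Pre_max_to_right_fun arr) := by unfold Pre_max_to_right_fun; infer_instance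
def pvWitness_max_to_right_fun : List Int := ([3, 1, 4, 1, 5])

def Spec_max_to_right_fun (arr : List Int) (out : List Int) : Prop := out = max_to_right_fun_alt arr
instance (arr : List Int) (out : List Int) : Decidable (Spec_max_to_right_fun arr out) := by unfold Spec_max_to_right_fun; infer_instance

-- ===== CLAIM (what is proved, stated in full; the proofs are below) =====
def Claim_equal_max_to_right_fun : Prop := ∀ (arr : List Int), Dom_max_to_right_fun arr → Pre_max_to_right_fun arr → Spec_max_to_right_fun arr (max_to_right_fun arr)

-- ===== LEMMAS AND PROOFS =====

-- common reference recursion: (answer list, running max of the whole list)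
def specA : List Int → (List Int × Int)
  | [] => ([], 0)
  | [x] => ([-1], x)
  | x :: y :: t =>
      let p := specA (y :: t)
      ((if x < p.2 then p.2 else -1) :: p.1, max p.2 x)

lemma specA_cons (x : Int) (xs : List Int) (h : xs ≠ []) :
    specA (x :: xs) =
      ((if x < (specA xs).2 then (specA xs).2 else -1) :: (specA xs).1, max (specA xs).2 x) := by
  cases xs with
  | nil => exact absurd rfl h
  | cons y t => rfl

lemma pyGet_cons_neg_one (x : Int) (xs : List Int) (h : xs ≠ []) :
    PySem.List.pyGet? (x :: xs) (-1) = PySem.List.pyGet? xs (-1) := by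
  have hl : xs.length ≠ 0 := by simpa using h
  simp only [PySem.List.pyGet?, PySem.List.pyIdx?, List.length_cons, neg_neg, Int.toNat_one,
    if_neg (show ¬ (0:Int) ≤ -1 by omega),
    if_pos (show -(((xs.length + 1 : Nat)):Int) ≤ -1 by push_cast; omega),
    if_pos (show -((xs.length:Int)) ≤ -1 by omega), Option.bind]
  have : (xs.length + 1) - 1 = (xs.length - 1) + 1 := by omega
  rw [this, List.getElem?_cons_succ]

lemma pyGet_cons_succ (x : Int) (xs : List Int) (i : Int) (h : 0 ≤ i) :
    PySem.List.pyGet? (x :: xs) (i + 1) = PySem.List.pyGet? xs i := by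
  by_cases hi : i < (xs.length : Int)
  · simp only [PySem.List.pyGet?, PySem.List.pyIdx?, List.length_cons,
      if_pos (show (0:Int) ≤ i + 1 by omega), if_pos h,
      if_pos (show i + 1 < (((xs.length + 1 : Nat)):Int) by push_cast; omega), if_pos hi,
      Option.bind]
    have : (i+1).toNat = i.toNat + 1 := by omega
    rw [this, List.getElem?_cons_succ]
  · simp only [PySem.List.pyGet?, PySem.List.pyIdx?, List.length_cons,
      if_pos (show (0:Int) ≤ i + 1 by omega), if_pos h,
      if_neg (show ¬ i + 1 < (((xs.length + 1 : Nat)):Int) by push_cast; omega), if_neg hi,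
      Option.bind]

lemma pyGet_cons_zero (x : Int) (xs : List Int) :
    PySem.List.pyGet? (x :: xs) 0 = some x := by
  simp [PySem.List.pyGet?, PySem.List.pyIdx?]

lemma getNegOne_of_ne_nil (l : List Int) (h : l ≠ []) :
    ∃ m, PySem.List.pyGet? l (-1) = some m := by
  have hl : l.length ≠ 0 := by simpa using h
  simp only [PySem.List.pyGet?, PySem.List.pyIdx?, neg_neg, Int.toNat_one,
    if_neg (show ¬ (0:Int) ≤ -1 by omega), if_pos (show -((l.length:Int)) ≤ -1 by omega),
    Option.bind]
  have hlt : l.length - 1 < l.length := by omega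
  exact ⟨l[l.length - 1], by rw [List.getElem?_eq_getElem hlt]⟩

lemma lastIdx_eq (l : List Int) (h : l ≠ []) :
    PySem.List.pyGet? l ((l.length : Int) - 1) = PySem.List.pyGet? l (-1) := by
  have hl : l.length ≠ 0 := by simpa using h
  simp only [PySem.List.pyGet?, PySem.List.pyIdx?, neg_neg, Int.toNat_one,
    if_pos (show (0:Int) ≤ (l.length:Int) - 1 by omega),
    if_pos (show (l.length:Int) - 1 < (l.length:Int) by omega),
    if_neg (show ¬ (0:Int) ≤ -1 by omega), if_pos (show -((l.length:Int)) ≤ -1 by omega)]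
  have : ((l.length:Int) - 1).toNat = l.length - 1 := by omega
  rw [this]

lemma pyRange_desc (k : Nat) :
    PySem.List.pyRange ((k : Int) - 1) (-1) (-1) =
      (List.range k).map (fun j : Nat => (k : Int) - 1 - (j : Int)) := by
  simp only [PySem.List.pyRange, neg_neg]
  rw [if_neg (by omega : (-1:Int) ≠ 0)]
  rw [if_neg (by omega : ¬ (0:Int) < -1)]
  by_cases hk : 0 < k
  · rw [if_pos (by omega : (-1:Int) < (k:Int) - 1)]
    have : (((k:Int) - 1 - (-1) + 1 - 1) / 1).toNat = k := by omega
    rw [this]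
    apply List.map_congr_left
    intro j hj
    omega
  · have hk0 : k = 0 := by omega
    subst hk0
    rw [if_neg (by norm_num)]
    simp

lemma shiftA (x : Int) (xs : List Int) (ds : List Int) (h : ∀ i ∈ ds, 0 ≤ i)
    (a0 : Int) (rest : List Int) (m : Int) :
    (ds.map (· + 1)).foldl (pyAstep (x :: xs)) (a0 :: rest, m) =
      ((a0 :: (ds.foldl (pyAstep xs) (rest, m)).1), (ds.foldl (pyAstep xs) (rest, m)).2) := by
  induction ds generalizing rest m with
  | nil => rfl
  | cons i ds ih =>
      have hi : 0 ≤ i := h i (by simp)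
      have hstep : pyAstep (x :: xs) (a0 :: rest, m) (i + 1) =
          ((a0 :: (pyAstep xs (rest, m) i).1), (pyAstep xs (rest, m) i).2) := by
        unfold pyAstep
        rw [pyGet_cons_succ x xs i hi]
        cases PySem.List.pyGet? xs i with
        | none => rfl
        | some a =>
            simp only
            split
            · have h1 : (i + 1).toNat = i.toNat + 1 := by omega
              simp [h1]
            · rfl
      simp only [List.map_cons, List.foldl_cons, hstep]
      exact ih (fun j hj => h j (by simp [hj])) _ _

lemma runA_spec : ∀ (l : List Int) (m : Int), PySem.List.pyGet? l (-1) = some m →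
    (PySem.List.pyRange ((l.length : Int) - 1 - 1) (-1) (-1)).foldl (pyAstep l)
      (List.replicate l.length (-1), m) = specA l := by
  intro l
  induction l with
  | nil => intro m hm; simp [PySem.List.pyGet?, PySem.List.pyIdx?] at hm
  | cons x xs ih =>
      intro m hm
      by_cases hxsne : xs = []
      · subst hxsne
        have hmx : m = x := by
          simp [PySem.List.pyGet?, PySem.List.pyIdx?] at hm
          omega
        subst hmx
        norm_num [PySem.List.pyRange, specA]
      · have hl : xs.length ≠ 0 := by simpa using hxsne
        have hm' : PySem.List.pyGet? xs (-1) = some m := by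
          rw [← pyGet_cons_neg_one x xs hxsne]; exact hm
        have hrange : PySem.List.pyRange (((x :: xs).length : Int) - 1 - 1) (-1) (-1) =
            ((List.range (xs.length - 1)).map
                (fun j : Nat => ((xs.length - 1 : Nat) : Int) - 1 - (j : Int))).map (· + 1)
              ++ [(0 : Int)] := by
          have h1 : (((x :: xs).length : Int) - 1 - 1) = ((xs.length : Nat) : Int) - 1 := by
            push_cast [List.length_cons]; ring
          rw [h1, pyRange_desc xs.length]
          have h2 : xs.length = (xs.length - 1) + 1 := by omega
          rw [h2, List.range_succ]
          rw [List.map_append, List.map_map]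
          congr 1
          · apply List.map_congr_left
            intro j hj
            simp only [Function.comp_apply]
            push_cast [Nat.sub_add_cancel]; omega
          · simp only [List.map_cons, List.map_nil, List.cons.injEq, and_true]
            omega
        have hds : ∀ i ∈ (List.range (xs.length - 1)).map
            (fun j : Nat => ((xs.length - 1 : Nat) : Int) - 1 - (j : Int)), 0 ≤ i := by
          intro i hi
          simp only [List.mem_map, List.mem_range] at hi
          obtain ⟨j, hj, rfl⟩ := hi
          omega
        have hinner : (((List.range (xs.length - 1)).map
              (fun j : Nat => ((xs.length - 1 : Nat) : Int) - 1 - (j : Int))).foldl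
                (pyAstep xs) (List.replicate xs.length (-1), m)) = specA xs := by
          rw [← pyRange_desc (xs.length - 1)]
          have h3 : (((xs.length - 1 : Nat)) : Int) - 1 = ((xs.length : Nat) : Int) - 1 - 1 := by
            omega
          rw [h3]
          exact ih m hm'
        rw [hrange]
        have hrep : List.replicate (x :: xs).length (-1 : Int) =
            (-1 : Int) :: List.replicate xs.length (-1) := by
          simp [List.replicate_succ]
        rw [hrep, List.foldl_append, shiftA x xs _ hds (-1) _ m, hinner]
        simp only [List.foldl_cons, List.foldl_nil]
        unfold pyAstep
        rw [pyGet_cons_zero]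
        rw [specA_cons x xs hxsne]
        simp only
        split
        · rename_i hlt
          have hmax : max (specA xs).2 x = (specA xs).2 := by omega
          simp [hmax]
        · rename_i hge
          have hmax : max (specA xs).2 x = x := by omega
          simp [hmax]

-- ===== B-side lemmas =====

-- reference recursion for the inclusive suffix-maximum table
def sufMax : List Int → List Int
  | [] => []
  | x :: xs => (match sufMax xs with | [] => x | m :: _ => max x m) :: sufMax xs

lemma foldl_max_pull (t : List Int) (a b : Int) :
    max (t.foldl max a) b = t.foldl max (max b a) := by
  induction t generalizing a with
  | nil => simp [max_comm]
  | cons c t ih =>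
      simp only [List.foldl_cons]
      rw [ih (max a c)]
      have : max b (max a c) = max (max b a) c := by omega
      rw [this]

lemma sufMax_cons (x : Int) (xs : List Int) :
    sufMax (x :: xs) = xs.foldl max x :: sufMax xs := by
  induction xs generalizing x with
  | nil => rfl
  | cons y t ih =>
      show (match sufMax (y :: t) with | [] => x | m :: _ => max x m) :: sufMax (y :: t) = _
      rw [ih y]
      simp only [List.foldl_cons]
      have : max x (t.foldl max y) = t.foldl max (max x y) := by
        rw [max_comm x (t.foldl max y), foldl_max_pull]
      rw [this]

lemma sufMax_append (l r : List Int) (hr : r ≠ []) :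
    sufMax (l ++ r) =
      (sufMax l).map (fun s => max s ((sufMax r).headD 0)) ++ sufMax r := by
  obtain ⟨y, r', rfl⟩ := List.exists_cons_of_ne_nil hr
  induction l with
  | nil => simp [sufMax]
  | cons x l ih =>
      rw [List.cons_append, sufMax_cons x (l ++ y :: r'), ih, sufMax_cons x l,
        List.map_cons, List.cons_append]
      congr 1
      rw [sufMax_cons y r', List.headD_cons, List.foldl_append, List.foldl_cons,
        max_comm (l.foldl max x) (List.foldl max y r'), foldl_max_pull,
        foldl_max_pull r' y (List.foldl max x l), ← foldl_max_pull l x y]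

lemma specA_snd_eq_foldl (x : Int) (xs : List Int) :
    (specA (x :: xs)).2 = xs.foldl max x := by
  induction xs generalizing x with
  | nil => rfl
  | cons y t ih =>
      rw [specA_cons x (y :: t) (by simp)]
      simp only [List.foldl_cons]
      rw [ih y, foldl_max_pull t y x, max_comm x y]

lemma pyGo_eq_sufMax (a : List Int) : pyGo a = sufMax a := by
  induction a using pyGo.induct with
  | case1 a h =>
      rw [pyGo, if_pos h]
      match a, h with
      | [], _ => rfl
      | [x], _ => rfl
  | case2 a h mid ihl ihr =>
      have hmid : mid = PySem.Int.floordiv ((a.length : Nat) : Int) 2 := rfl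
      rw [hmid] at ihl ihr
      have h2 : PySem.Int.floordiv ((a.length : Nat) : Int) 2 = ((a.length / 2 : Nat) : Int) := by
        have := PySem.Int.floordiv_natCast a.length 2
        rw [show ((2 : Nat) : Int) = (2 : Int) by norm_num] at this
        exact this
      have hsl : PySem.List.slice a none (some (PySem.Int.floordiv (a.length : Int) 2)) =
          a.take (a.length / 2) := by
        rw [h2, PySem.List.slice_to_natCast]
      have hsr : PySem.List.slice a (some (PySem.Int.floordiv (a.length : Int) 2)) none =
          a.drop (a.length / 2) := by
        rw [h2, PySem.List.slice_from_natCast]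
      have hrne : a.drop (a.length / 2) ≠ [] := by
        intro hc
        have := congrArg List.length hc
        simp only [List.length_drop, List.length_nil] at this
        omega
      have hhead : ((PySem.List.pyGet? (sufMax (a.drop (a.length / 2))) 0).getD 0) =
          (sufMax (a.drop (a.length / 2))).headD 0 := by
        obtain ⟨y, r', heq⟩ := List.exists_cons_of_ne_nil hrne
        rw [heq, sufMax_cons, pyGet_cons_zero]
        rfl
      rw [pyGo, if_neg h]
      simp only [hsl, hsr] at ihl ihr ⊢
      rw [ihl, ihr, hhead, ← sufMax_append _ _ hrne, List.take_append_drop]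

lemma runB_spec : ∀ (xs : List Int) (x : Int),
    ((x :: xs).zip ((sufMax (x :: xs)).tail)).map
        (fun xm => if xm.1 < xm.2 then xm.2 else -1) ++ [-1] = (specA (x :: xs)).1 := by
  intro xs
  induction xs with
  | nil => intro x; rfl
  | cons y t ih =>
      intro x
      rw [sufMax_cons, List.tail_cons, sufMax_cons, List.zip_cons_cons, List.map_cons,
        List.cons_append, specA_cons x (y :: t) (by simp)]
      have h2 : (specA (y :: t)).2 = t.foldl max y := specA_snd_eq_foldl y t
      rw [← h2]
      congr 1
      have := ih y
      rw [sufMax_cons, List.tail_cons] at this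
      exact this

-- ===== VERDICT (by name: the statement is the Claim_ definition above) =====
theorem max_to_right_fun_spec : Claim_equal_max_to_right_fun := by
  intro arr _ hpre
  obtain ⟨m, hm⟩ := getNegOne_of_ne_nil arr hpre
  show max_to_right_fun arr = max_to_right_fun_alt arr
  simp only [max_to_right_fun]
  rw [lastIdx_eq arr hpre, hm]
  simp only
  rw [runA_spec arr m hm]
  obtain ⟨x, xs, rfl⟩ := List.exists_cons_of_ne_nil hpre
  show (specA (x :: xs)).1 = max_to_right_fun_alt (x :: xs)
  simp only [max_to_right_fun_alt, pyGo_eq_sufMax, PySem.List.slice_from_one]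
  rw [runB_spec xs x]
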